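-- pv_equiv track=rewrite | github.com/ITE-5th/skill-face-recognizer | __init__.py | handle_message
-- ===== SOURCE A (Python) =====
-- def handle_message(response):
--     """
--     converts server response to meaningful sentence
--     :param response: string of people names includes unknown
--     :return: dictionary contains sentence in result
--     """
--     unknown = 'Unknown'
--     persons = response.split(',')
--     unk_count = sum([x.split(' ').count(unknown) for i, x in enumerate(persons)])
--
--     # remove Unknown
--     persons = [x for i, x in enumerate(persons) if x.split(' ')[0] != unknown]
--     for idx, person in enumerate(persons):
--         person = person.split(' ')
--         persons[idx] = person[0].replace('_', ' ').title()
--         persons[idx] += ','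
--         # persons[idx] += ' With probability of {} Percent . '.format(person[1])
--
--     if unk_count > 0:
--         persons.append(str(unk_count) + ' Unknown ' + ('persons' if unk_count > 1 else 'person'))
--
--     persons_count = len(persons)
--     phrase = ''
--     for i in range(persons_count):
--         phrase += persons[i]
--         phrase += ' and ' if i == persons_count - 2 and persons_count > 1 else ''
--     return {'result': phrase}
-- ===== SOURCE B (Python) =====
-- def handle_message(response):
--     segs = response.split(',')
--     unk = 0
--     for seg in segs:
--         unk += seg.split(' ').count('Unknown')
--     # build the sentence back-to-front: start from the Unknown summary (the last part,
--     # if any) and prepend each kept name, inserting ' and ' exactly when one part follows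
--     if unk > 0:
--         tail = str(unk) + ' Unknown ' + ('persons' if unk > 1 else 'person')
--         n = 1
--     else:
--         tail = ''
--         n = 0
--     for seg in reversed(segs):
--         first = seg.split(' ')[0]
--         if first != 'Unknown':
--             part = first.replace('_', ' ').title() + ','
--             if n == 0:
--                 tail = part
--             elif n == 1:
--                 tail = part + ' and ' + tail
--             else:
--                 tail = part + tail
--             n += 1
--     return {'result': tail}
-- ===== Notes on version B (the rewrite author's own statement) =====
-- stated objective: alternative
-- what changed: B never materialises A's list of formatted parts: after one counting pass it builds the sentence back-to-front, iterating the segments in reverse and prepending each kept name onto the growing phrase, inserting the connective exactly when one part already follows, instead of A's filter pass + rename pass + indexed join loop.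
import Mathlib
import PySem

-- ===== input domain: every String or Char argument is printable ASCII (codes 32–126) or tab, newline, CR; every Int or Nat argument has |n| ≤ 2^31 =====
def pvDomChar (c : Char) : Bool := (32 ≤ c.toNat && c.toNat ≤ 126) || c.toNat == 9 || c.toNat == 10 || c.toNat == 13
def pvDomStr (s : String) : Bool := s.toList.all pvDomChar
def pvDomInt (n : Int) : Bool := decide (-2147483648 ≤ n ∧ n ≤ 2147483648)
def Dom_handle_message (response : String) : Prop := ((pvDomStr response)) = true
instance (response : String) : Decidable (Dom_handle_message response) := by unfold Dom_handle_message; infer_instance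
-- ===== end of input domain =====

-- B builds the sentence back-to-front in a reverse pass, prepending each kept name onto the
-- growing phrase, with no intermediate list of parts; objective: alternative decomposition, same cost.

-- hand port of Python str.title() (PySem has none): exact on ASCII, where the cased
-- characters are exactly the letters; shared by both ports since both Pythons call .title()
def pyTitle : List Char → Bool → List Char
  | [], _ => []
  | c :: cs, prev =>
    (if PySem.Chars.isalpha c then
        (if prev then PySem.Chars.lowerChar c else PySem.Chars.upperChar c)
      else c) :: pyTitle cs (PySem.Chars.isalpha c)

-- ===== PORT A =====
def handle_message (response : String) : List (String × String) :=
  let unknown := "Unknown".toList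
  let persons := PySem.Chars.splitOn response.toList [',']
  let unk_count : Int :=
    ((PySem.List.enumerate persons).map
      (fun ix => (PySem.List.count (PySem.Chars.splitOn ix.2 [' ']) unknown : Int))).sum
  let persons1 := ((PySem.List.enumerate persons).filter
      (fun ix => !(PySem.List.pyGetD (PySem.Chars.splitOn ix.2 [' ']) 0 [] == unknown))).map (·.2)
  let persons2 := persons1.map (fun person =>
      let p := PySem.Chars.splitOn person [' ']
      pyTitle (PySem.Chars.replace (PySem.List.pyGetD p 0 []) ['_'] [' ']) false ++ [','])
  let persons3 := if unk_count > 0 then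
      persons2 ++ [(PySem.Int.toStr unk_count).toList ++ " Unknown ".toList ++
        (if unk_count > 1 then "persons".toList else "person".toList)]
    else persons2
  let persons_count : Int := PySem.List.len persons3
  let phrase := (PySem.List.pyRange 0 persons_count).foldl
      (fun acc i => (acc ++ PySem.List.pyGetD persons3 i []) ++
        (if i == persons_count - 2 && decide (persons_count > 1) then " and ".toList else [])) []
  [("result", String.ofList phrase)]

-- ===== PORT B =====
def handle_message_alt (response : String) : List (String × String) :=
  let segs := PySem.Chars.splitOn response.toList [',']
  let unk : Int := segs.foldl
      (fun u seg => u + (PySem.List.count (PySem.Chars.splitOn seg [' ']) "Unknown".toList : Int)) 0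
  let init : List Char × Int :=
    if unk > 0 then
      ((PySem.Int.toStr unk).toList ++ " Unknown ".toList ++
        (if unk > 1 then "persons".toList else "person".toList), 1)
    else ([], 0)
  -- 'for seg in reversed(segs)': a foldl over segs.reverse
  let res := segs.reverse.foldl
      (fun (st : List Char × Int) seg =>
        let first := PySem.List.pyGetD (PySem.Chars.splitOn seg [' ']) 0 []
        if !(first == "Unknown".toList) then
          let part := pyTitle (PySem.Chars.replace first ['_'] [' ']) false ++ [',']
          if st.2 == 0 then (part, st.2 + 1)
          else if st.2 == 1 then (part ++ " and ".toList ++ st.1, st.2 + 1)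
          else (part ++ st.1, st.2 + 1)
        else st) init
  [("result", String.ofList res.1)]

-- ===== PRECONDITION & SPEC =====
def Spec_handle_message (response : String) (out : List (String × String)) : Prop := out = handle_message_alt response
instance (response : String) (out : List (String × String)) : Decidable (Spec_handle_message response out) := by unfold Spec_handle_message; infer_instance

-- ===== CLAIM (what is proved, stated in full; the proofs are below) =====
def Claim_equal_handle_message : Prop := ∀ (response : String), Dom_handle_message response → Spec_handle_message response (handle_message response)

-- ===== LEMMAS AND PROOFS =====

-- the parts A materialises, the per-segment Unknown count, and the optional summary part
def segCount (x : List Char) : Int := (PySem.List.count (PySem.Chars.splitOn x [' ']) "Unknown".toList : Int)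
def segKeep (x : List Char) : Bool := !(PySem.List.pyGetD (PySem.Chars.splitOn x [' ']) 0 [] == "Unknown".toList)
def segPart (x : List Char) : List Char :=
  pyTitle (PySem.Chars.replace (PySem.List.pyGetD (PySem.Chars.splitOn x [' ']) 0 []) ['_'] [' ']) false ++ [',']
def sfx (u : Int) : List (List Char) :=
  if u > 0 then [(PySem.Int.toStr u).toList ++ " Unknown ".toList ++
      (if u > 1 then "persons".toList else "person".toList)]
  else []

def tailJoin : List (List Char) → List Char
  | [] => []
  | [p] => p
  | x :: y :: rest => x ++ (if rest = [] then " and ".toList else []) ++ tailJoin (y :: rest)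

theorem enum_map_snd {α β : Type} (g : α → β) (xs : List α) (s : Int) :
    (PySem.List.enumerate xs s).map (fun ix => g ix.2) = xs.map g := by
  have h := PySem.List.map_snd_enumerate xs s
  calc (PySem.List.enumerate xs s).map (fun ix => g ix.2)
      = ((PySem.List.enumerate xs s).map (·.2)).map g := by rw [List.map_map]; rfl
    _ = xs.map g := by rw [h]

theorem enum_filter_snd {α : Type} (p : α → Bool) (xs : List α) (s : Int) :
    (((PySem.List.enumerate xs s).filter (fun ix => p ix.2)).map (·.2)) = xs.filter p := by
  induction xs generalizing s with
  | nil => simp [PySem.List.enumerate_nil]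
  | cons x xs ih =>
    rw [PySem.List.enumerate_cons]
    by_cases h : p x = true <;> simp [List.filter, h, ih]

theorem fold_phrase (ps : List (List Char)) (j k : Nat) (acc : List Char)
    (h : k + j = ps.length) :
    (PySem.List.pyRange (k : Int) (PySem.List.len ps)).foldl
      (fun acc i => (acc ++ PySem.List.pyGetD ps i []) ++
        (if i == (PySem.List.len ps) - 2 && decide ((PySem.List.len ps) > 1) then " and ".toList else [])) acc
    = acc ++ tailJoin (ps.drop k) := by
  induction j generalizing k acc with
  | zero =>
    have hk : (k : Int) = PySem.List.len ps := by simp [PySem.List.len]; omega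
    rw [hk]
    simp [PySem.List.pyRange_of_pos, List.drop_of_length_le (by omega : ps.length ≤ k), tailJoin]
  | succ j ih =>
    have hlt : (k : Int) < PySem.List.len ps := by simp [PySem.List.len]; omega
    rw [PySem.List.pyRange_one_cons hlt, List.foldl_cons]
    rw [show ((k : Int) + 1) = (((k+1 : Nat)) : Int) from by push_cast; ring]
    rw [ih (k+1) _ (by omega)]
    have hkl : k < ps.length := by omega
    have hdrop : ps.drop k = ps[k] :: ps.drop (k+1) := List.drop_eq_getElem_cons hkl
    rw [hdrop]
    have hget : PySem.List.pyGetD ps (k : Int) [] = ps[k] := by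
      rw [PySem.List.pyGetD_natCast]; exact List.getD_eq_getElem _ _ hkl
    rw [hget]
    rcases hj : ps.drop (k+1) with _ | ⟨y, rest⟩
    · -- last element: k = length - 1
      have : j = 0 := by have := congrArg List.length hj; simp at this; omega
      subst this
      have hcond : ((k : Int) == (PySem.List.len ps) - 2 && decide ((PySem.List.len ps) > 1)) = false := by
        simp [PySem.List.len]; intro hk2; omega
      rw [hcond]
      simp [tailJoin]
    · have hj2 : 1 ≤ j := by have := congrArg List.length hj; simp at this; omega
      rcases hrest : rest with _ | ⟨z, r⟩
      · -- exactly two remain: k = length - 2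
        have hcond : ((k : Int) == (PySem.List.len ps) - 2 && decide ((PySem.List.len ps) > 1)) = true := by
          subst hrest
          simp [PySem.List.len]
          have := congrArg List.length hj; simp at this
          omega
        subst hrest
        rw [hcond]
        simp [tailJoin]
      · have hcond : ((k : Int) == (PySem.List.len ps) - 2 && decide ((PySem.List.len ps) > 1)) = false := by
          subst hrest
          have := congrArg List.length hj; simp at this
          simp [PySem.List.len]; intro hk2; omega
        subst hrest
        rw [hcond]
        simp [tailJoin]

theorem fold_phrase0 (ps : List (List Char)) :
    (PySem.List.pyRange 0 (PySem.List.len ps)).foldl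
      (fun acc i => (acc ++ PySem.List.pyGetD ps i []) ++
        (if i == (PySem.List.len ps) - 2 && decide ((PySem.List.len ps) > 1) then " and ".toList else [])) []
    = tailJoin ps := by
  have h := fold_phrase ps ps.length 0 [] (by omega)
  rw [show (((0 : Nat)) : Int) = (0 : Int) from rfl, List.drop_zero] at h
  exact h

-- B's counting loop computes the sum A's comprehension computes
theorem foldl_count (segs : List (List Char)) (a : Int) :
    segs.foldl (fun u seg => u + segCount seg) a = a + (segs.map segCount).sum := by
  induction segs generalizing a with
  | nil => simp
  | cons x xs ih => simp only [List.foldl_cons, List.map_cons, List.sum_cons, ih]; ring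

-- B's reverse pass, seen as a foldr, prepends the kept parts onto any tail phrase
theorem foldr_go (segs : List (List Char)) (L : List (List Char)) :
    segs.foldr
      (fun seg (st : List Char × Int) =>
        if segKeep seg then
          if st.2 == 0 then (segPart seg, st.2 + 1)
          else if st.2 == 1 then (segPart seg ++ " and ".toList ++ st.1, st.2 + 1)
          else (segPart seg ++ st.1, st.2 + 1)
        else st)
      (tailJoin L, (L.length : Int))
    = (tailJoin ((segs.filter segKeep).map segPart ++ L),
       (((segs.filter segKeep).map segPart ++ L).length : Int)) := by
  induction segs with
  | nil => simp
  | cons x xs ih =>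
    simp only [List.foldr_cons, ih, List.filter_cons]
    rcases h : segKeep x with _ | _
    · simp
    · simp only [if_true, List.map_cons, List.cons_append]
      rcases hL : (xs.filter segKeep).map segPart ++ L with _ | ⟨t, _ | ⟨t2, r⟩⟩
      · simp [tailJoin]
      · simp [tailJoin]
      · have hlen : ((t :: t2 :: r).length : Int) = (r.length : Int) + 2 := by
          simp; omega
        have h0 : (((t :: t2 :: r).length : Int) == 0) = false := by
          rw [hlen]; simp; omega
        have h1 : (((t :: t2 :: r).length : Int) == 1) = false := by
          rw [hlen]; simp; omega
        rw [h0, h1]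
        simp only [Bool.false_eq_true, if_false, Prod.mk.injEq]
        refine ⟨by simp [tailJoin], by simp⟩

theorem sfx_tailJoin (u : Int) : tailJoin (sfx u) = (if u > 0 then
      (PySem.Int.toStr u).toList ++ " Unknown ".toList ++
        (if u > 1 then "persons".toList else "person".toList)
    else []) := by
  unfold sfx; split_ifs <;> simp [tailJoin]

theorem sfx_len (u : Int) : ((sfx u).length : Int) = (if u > 0 then 1 else 0) := by
  unfold sfx; split_ifs <;> simp

-- ===== VERDICT (by name: the statement is the Claim_ definition above) =====
theorem handle_message_spec : Claim_equal_handle_message := by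
  intro response _
  unfold Spec_handle_message
  simp only [handle_message, handle_message_alt]
  rw [show (fun ix : Int × List Char =>
        ((PySem.List.count (PySem.Chars.splitOn ix.2 [' ']) "Unknown".toList : Int)))
      = (fun ix => segCount ix.2) from rfl]
  rw [enum_map_snd]
  rw [show (fun ix : Int × List Char =>
        !(PySem.List.pyGetD (PySem.Chars.splitOn ix.2 [' ']) 0 [] == "Unknown".toList))
      = (fun ix => segKeep ix.2) from rfl]
  rw [enum_filter_snd]
  rw [show (fun person =>
        pyTitle (PySem.Chars.replace (PySem.List.pyGetD (PySem.Chars.splitOn person [' ']) 0 []) ['_'] [' ']) false ++ [','])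
      = segPart from rfl]
  rw [show (fun (u : Int) seg => u + ((PySem.List.count (PySem.Chars.splitOn seg [' ']) "Unknown".toList : Int)))
      = (fun u seg => u + segCount seg) from rfl]
  rw [foldl_count, zero_add]
  set segs := PySem.Chars.splitOn response.toList [','] with hsegs
  set u : Int := (segs.map segCount).sum with hu
  have hps : (if u > 0 then
        (segs.filter segKeep).map segPart ++ [(PySem.Int.toStr u).toList ++ " Unknown ".toList ++
          (if u > 1 then "persons".toList else "person".toList)]
      else (segs.filter segKeep).map segPart)
      = (segs.filter segKeep).map segPart ++ sfx u := by
    unfold sfx; split_ifs <;> simp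
  rw [hps, fold_phrase0]
  rw [show (fun (st : List Char × Int) seg =>
        let first := PySem.List.pyGetD (PySem.Chars.splitOn seg [' ']) 0 []
        if !(first == "Unknown".toList) then
          let part := pyTitle (PySem.Chars.replace first ['_'] [' ']) false ++ [',']
          if st.2 == 0 then (part, st.2 + 1)
          else if st.2 == 1 then (part ++ " and ".toList ++ st.1, st.2 + 1)
          else (part ++ st.1, st.2 + 1)
        else st)
      = (fun (st : List Char × Int) seg =>
        if segKeep seg then
          if st.2 == 0 then (segPart seg, st.2 + 1)
          else if st.2 == 1 then (segPart seg ++ " and ".toList ++ st.1, st.2 + 1)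
          else (segPart seg ++ st.1, st.2 + 1)
        else st) from rfl]
  rw [show (if u > 0 then
        (((PySem.Int.toStr u).toList ++ " Unknown ".toList ++
          (if u > 1 then "persons".toList else "person".toList)), (1 : Int))
      else (([] : List Char), (0 : Int)))
      = (tailJoin (sfx u), ((sfx u).length : Int)) from by
    rw [sfx_tailJoin, sfx_len]; split_ifs <;> rfl]
  rw [List.foldl_reverse]
  rw [foldr_go]
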